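-- pv_equiv track=rewrite | github.com/opensensor/bionpu | src/bionpu/data/cpg_oracle.py | merge_candidate_positions_to_islands
-- ===== SOURCE A (Python) =====
-- from typing import Final
--
-- CPG_DEFAULT_W: Final[int] = 200
--
-- def merge_candidate_positions_to_islands(
--     positions: list[int],
--     w: int = CPG_DEFAULT_W,
-- ) -> list[tuple[int, int]]:
--     """Merge raw candidate window-start positions into CpG islands.
--
--     Unlike :func:`merge_streak_positions_to_islands`, this helper
--     accepts every position whose length-``w`` window passes the
--     thresholds. Only contiguous candidate runs with length ``>= w`` are
--     emitted as islands.
--     """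
--     if not positions:
--         return []
--     out: list[tuple[int, int]] = []
--     run_start = positions[0]
--     prev = positions[0]
--     run_len = 1
--     for p in positions[1:]:
--         if p == prev + 1:
--             prev = p
--             run_len += 1
--             continue
--         if run_len >= w:
--             out.append((run_start, prev + w))
--         run_start = p
--         prev = p
--         run_len = 1
--     if run_len >= w:
--         out.append((run_start, prev + w))
--     return out
-- ===== SOURCE B (Python) =====
-- def merge_candidate_positions_to_islands(positions, w=200):
--     """Traverse right-to-left, maintaining a list of run summaries
--     (start, last, length): each position either extends the most recently
--     built run (the one starting at p + 1) or opens a new run.  A second,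
--     separate pass over the runs (in original order) emits the islands."""
--     runs = []
--     for p in reversed(positions):
--         if runs and runs[-1][0] == p + 1:
--             _, last, ln = runs[-1]
--             runs[-1] = (p, last, ln + 1)
--         else:
--             runs.append((p, p, 1))
--     return [(s, last + w) for s, last, ln in reversed(runs) if ln >= w]
-- ===== Notes on version B (the rewrite author's own statement) =====
-- stated objective: alternative
-- what changed: A streams left-to-right with three scalar accumulators (run_start, prev, run_len) and emits islands inline; B traverses the list right-to-left maintaining a list of run summaries (start, last, length) as its data structure, then a separate comprehension pass over the reversed run list emits the islands.
import Mathlib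
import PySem

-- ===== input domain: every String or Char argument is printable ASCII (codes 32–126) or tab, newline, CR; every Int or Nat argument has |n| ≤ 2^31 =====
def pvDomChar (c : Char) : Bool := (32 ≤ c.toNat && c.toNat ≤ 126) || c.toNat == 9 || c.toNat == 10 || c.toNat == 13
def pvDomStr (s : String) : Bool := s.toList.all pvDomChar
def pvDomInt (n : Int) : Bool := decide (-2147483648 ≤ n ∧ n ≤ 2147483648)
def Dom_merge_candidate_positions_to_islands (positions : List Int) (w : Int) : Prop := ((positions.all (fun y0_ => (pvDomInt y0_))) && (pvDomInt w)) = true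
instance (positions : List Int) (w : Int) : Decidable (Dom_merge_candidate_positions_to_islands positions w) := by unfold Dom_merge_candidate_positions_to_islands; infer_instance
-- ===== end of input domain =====

-- B replaces A's forward stream with scalar accumulators by a right-to-left
-- traversal that builds a list of run summaries, emitted in a second pass
-- (objective: alternative decomposition, same cost).

-- ===== PORT A =====
-- the for-loop of A with state (out, run_start, prev, run_len)
def pvLoopA (w : Int) (out : List (Int × Int)) (run_start prev run_len : Int) :
    List Int → List (Int × Int)
  | [] => if run_len ≥ w then out ++ [(run_start, prev + w)] else out
  | p :: rest =>
    if p = prev + 1 then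
      pvLoopA w out run_start p (run_len + 1) rest
    else
      pvLoopA w (if run_len ≥ w then out ++ [(run_start, prev + w)] else out) p p 1 rest

def merge_candidate_positions_to_islands (positions : List Int) (w : Int) : List (Int × Int) :=
  match positions with
  | [] => []
  | p0 :: rest => pvLoopA w [] p0 p0 1 rest

-- ===== PORT B =====
-- the body of B's for-loop: extend the most recently built run or open a new one
-- (runs[-1] → getLast?, runs[-1] = … → dropLast ++ [...], runs.append → ++ [...])
def pvStepB (runs : List (Int × Int × Int)) (p : Int) : List (Int × Int × Int) :=
  match runs.getLast? with
  | some t => if t.1 = p + 1 then runs.dropLast ++ [(p, t.2.1, t.2.2 + 1)] else runs ++ [(p, p, 1)]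
  | none => [(p, p, 1)]

def merge_candidate_positions_to_islands_alt (positions : List Int) (w : Int) : List (Int × Int) :=
  let runs := positions.reverse.foldl pvStepB []
  (runs.reverse.filter (fun t => t.2.2 ≥ w)).map (fun t => (t.1, t.2.1 + w))

-- ===== PRECONDITION & SPEC =====
def Spec_merge_candidate_positions_to_islands (positions : List Int) (w : Int) (out : List (Int × Int)) : Prop := out = merge_candidate_positions_to_islands_alt positions w
instance (positions : List Int) (w : Int) (out : List (Int × Int)) : Decidable (Spec_merge_candidate_positions_to_islands positions w out) := by unfold Spec_merge_candidate_positions_to_islands; infer_instance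

-- ===== CLAIM (what is proved, stated in full; the proofs are below) =====
def Claim_equal_merge_candidate_positions_to_islands : Prop := ∀ (positions : List Int) (w : Int), Dom_merge_candidate_positions_to_islands positions w → Spec_merge_candidate_positions_to_islands positions w (merge_candidate_positions_to_islands positions w)

-- ===== LEMMAS AND PROOFS =====

-- reference model: runs summarised as (start, last, length) triples, built front-first
def pvConsT : (Int × Int × Int) → List (Int × Int × Int) → List (Int × Int × Int)
  | t, [] => [t]
  | t, u :: gs => if u.1 = t.2.1 + 1 then (t.1, u.2.1, t.2.2 + u.2.2) :: gs else t :: u :: gs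

def pvRunsT : List Int → List (Int × Int × Int)
  | [] => []
  | p :: ps => pvConsT (p, p, 1) (pvRunsT ps)

def pvStep (w : Int) (out : List (Int × Int)) (t : Int × Int × Int) : List (Int × Int) :=
  if t.2.2 ≥ w then out ++ [(t.1, t.2.1 + w)] else out

def pvEmit (w : Int) (out : List (Int × Int)) (gs : List (Int × Int × Int)) : List (Int × Int) :=
  gs.foldl (pvStep w) out

theorem pvConsT_head (t : Int × Int × Int) (gs : List (Int × Int × Int)) :
    ∃ l n gs', pvConsT t gs = (t.1, l, n) :: gs' := by
  cases gs with
  | nil => exact ⟨t.2.1, t.2.2, [], rfl⟩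
  | cons u gs =>
    by_cases h : u.1 = t.2.1 + 1
    · exact ⟨u.2.1, t.2.2 + u.2.2, gs, by simp [pvConsT, h]⟩
    · exact ⟨t.2.1, t.2.2, u :: gs, by simp [pvConsT, h]⟩

theorem pvConsT_merge (rs prev rl : Int) (gs : List (Int × Int × Int)) :
    pvConsT (rs, prev, rl) (pvConsT (prev + 1, prev + 1, 1) gs) =
    pvConsT (rs, prev + 1, rl + 1) gs := by
  cases gs with
  | nil => simp [pvConsT]
  | cons u gs =>
    by_cases h : u.1 = prev + 1 + 1
    · simp only [pvConsT, h, if_true]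
      simp
      omega
    · simp [pvConsT, h]

theorem pvLoopA_eq (w : Int) (rest : List Int) :
    ∀ (out : List (Int × Int)) (rs prev rl : Int),
      pvLoopA w out rs prev rl rest = pvEmit w out (pvConsT (rs, prev, rl) (pvRunsT rest)) := by
  induction rest with
  | nil => intro out rs prev rl; simp [pvLoopA, pvEmit, pvRunsT, pvConsT, pvStep]
  | cons p rest ih =>
    intro out rs prev rl
    by_cases h : p = prev + 1
    · subst h
      rw [pvLoopA, if_pos rfl, ih,
        show pvConsT (rs, prev, rl) (pvRunsT ((prev + 1) :: rest))
            = pvConsT (rs, prev + 1, rl + 1) (pvRunsT rest) from by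
          rw [show pvRunsT ((prev + 1) :: rest)
              = pvConsT (prev + 1, prev + 1, 1) (pvRunsT rest) from rfl, pvConsT_merge]]
    · obtain ⟨l, n, gs', hg⟩ := pvConsT_head (p, p, 1) (pvRunsT rest)
      have hruns : pvRunsT (p :: rest) = (p, l, n) :: gs' := hg
      have hnomerge : pvConsT (rs, prev, rl) (pvRunsT (p :: rest))
          = (rs, prev, rl) :: pvRunsT (p :: rest) := by
        rw [hruns]; simp [pvConsT, h]
      rw [pvLoopA, if_neg h, ih, hnomerge]
      rfl

theorem pvA_eq (positions : List Int) (w : Int) :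
    merge_candidate_positions_to_islands positions w = pvEmit w [] (pvRunsT positions) := by
  cases positions with
  | nil => rfl
  | cons p rest =>
    show pvLoopA w [] p p 1 rest = _
    rw [pvLoopA_eq]
    rfl

theorem pvStepB_rev (p : Int) (gs : List (Int × Int × Int)) :
    pvStepB gs.reverse p = (pvConsT (p, p, 1) gs).reverse := by
  cases gs with
  | nil => simp [pvStepB, pvConsT]
  | cons u rest =>
    by_cases h : u.1 = p + 1
    · simp [pvStepB, pvConsT, h]
      omega
    · simp [pvStepB, pvConsT, h]

theorem pvFoldB (positions : List Int) :
    positions.reverse.foldl pvStepB [] = (pvRunsT positions).reverse := by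
  induction positions with
  | nil => rfl
  | cons p ps ih =>
    rw [show (p :: ps).reverse = ps.reverse ++ [p] from by simp,
      List.foldl_append, ih]
    simp only [List.foldl]
    rw [pvStepB_rev]
    rfl

theorem pvEmit_eq (w : Int) (gs : List (Int × Int × Int)) :
    ∀ (out : List (Int × Int)),
      pvEmit w out gs = out ++ (gs.filter (fun t => t.2.2 ≥ w)).map (fun t => (t.1, t.2.1 + w)) := by
  induction gs with
  | nil => intro out; simp [pvEmit]
  | cons t gs ih =>
    intro out
    by_cases h : t.2.2 ≥ w
    · rw [show pvEmit w out (t :: gs) = pvEmit w (pvStep w out t) gs from rfl, ih]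
      simp [pvStep, h]
    · rw [show pvEmit w out (t :: gs) = pvEmit w (pvStep w out t) gs from rfl, ih]
      simp [pvStep, h]

theorem pvB_eq (positions : List Int) (w : Int) :
    merge_candidate_positions_to_islands_alt positions w = pvEmit w [] (pvRunsT positions) := by
  unfold merge_candidate_positions_to_islands_alt
  rw [pvFoldB]
  simp only [List.reverse_reverse]
  rw [pvEmit_eq]
  simp

-- ===== VERDICT (by name: the statement is the Claim_ definition above) =====
theorem merge_candidate_positions_to_islands_spec : Claim_equal_merge_candidate_positions_to_islands := by
  intro positions w _
  unfold Spec_merge_candidate_positions_to_islands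
  rw [pvA_eq, pvB_eq]
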